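-- pv_equiv track=rewrite | github.com/aldolares238/Inteligencia-artificial | 040_Logica_PlanificacionConficional_V0.py | planificacion_condicional
-- ===== SOURCE A (Python) =====
-- acciones = {
--     'despertarse': {'costo': 1, 'precondiciones': []},
--     'levantarse': {'costo': 1, 'precondiciones': ['despertarse']},
--     'tomar_cafe': {'costo': 2, 'precondiciones': ['levantarse']},
--     'ir_a_trabajo': {'costo': 2, 'precondiciones': ['despertarse', 'levantarse', 'tomar_cafe']},
--     'trabajar': {'costo': 3, 'precondiciones': ['ir_a_trabajo']}
-- }
--
-- def satisfacer_condicion(estado, condicion):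
--     return condicion in estado
--
-- def aplicar_accion(estado, accion):
--     for precondicion in acciones[accion]['precondiciones']:
--         if not satisfacer_condicion(estado, precondicion):
--             return None  # No se puede aplicar la acción
--     nuevo_estado = estado.copy()
--     nuevo_estado.append(accion)
--     return nuevo_estado
--
-- def planificacion_condicional(estado_actual, objetivo, acciones_disponibles, max_profundidad, plan_actual=[]):
--     if estado_actual == objetivo:
--         return plan_actual
--     if max_profundidad == 0:
--         return None
--     for accion in acciones_disponibles:
--         nuevo_estado = aplicar_accion(estado_actual, accion)
--         if nuevo_estado is not None:
--             nuevo_plan = plan_actual + [accion]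
--             resultado = planificacion_condicional(nuevo_estado, objetivo, acciones_disponibles, max_profundidad - 1, nuevo_plan)
--             if resultado is not None:
--                 return resultado
--     return None
-- ===== SOURCE B (Python) =====
-- acciones = {
--     'despertarse': {'costo': 1, 'precondiciones': []},
--     'levantarse': {'costo': 1, 'precondiciones': ['despertarse']},
--     'tomar_cafe': {'costo': 2, 'precondiciones': ['levantarse']},
--     'ir_a_trabajo': {'costo': 2, 'precondiciones': ['despertarse', 'levantarse', 'tomar_cafe']},
--     'trabajar': {'costo': 3, 'precondiciones': ['ir_a_trabajo']}
-- }
--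
-- def satisfacer_condicion(estado, condicion):
--     return condicion in estado
--
-- def aplicar_accion(estado, accion):
--     for precondicion in acciones[accion]['precondiciones']:
--         if not satisfacer_condicion(estado, precondicion):
--             return None
--     nuevo_estado = estado.copy()
--     nuevo_estado.append(accion)
--     return nuevo_estado
--
-- def planificacion_condicional(estado_actual, objetivo, acciones_disponibles, max_profundidad, plan_actual=[]):
--     # Iterative DFS with an explicit LIFO stack of (estado, plan, profundidad) frames.
--     stack = [(estado_actual, plan_actual, max_profundidad)]
--     while stack:
--         estado, plan, profundidad = stack.pop()
--         if estado == objetivo: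
--             return plan
--         if profundidad == 0:
--             continue
--         for accion in reversed(acciones_disponibles):
--             nuevo_estado = aplicar_accion(estado, accion)
--             if nuevo_estado is not None:
--                 stack.append((nuevo_estado, plan + [accion], profundidad - 1))
--     return None
-- ===== Notes on version B (the rewrite author's own statement) =====
-- stated objective: alternative
-- what changed: The recursive depth-first search is replaced by an iterative one with an explicit LIFO stack of (estado, plan, profundidad) frames, pushing children in reverse action order so the first solution popped is exactly A's left-to-right depth-first one.
import Mathlib
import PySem

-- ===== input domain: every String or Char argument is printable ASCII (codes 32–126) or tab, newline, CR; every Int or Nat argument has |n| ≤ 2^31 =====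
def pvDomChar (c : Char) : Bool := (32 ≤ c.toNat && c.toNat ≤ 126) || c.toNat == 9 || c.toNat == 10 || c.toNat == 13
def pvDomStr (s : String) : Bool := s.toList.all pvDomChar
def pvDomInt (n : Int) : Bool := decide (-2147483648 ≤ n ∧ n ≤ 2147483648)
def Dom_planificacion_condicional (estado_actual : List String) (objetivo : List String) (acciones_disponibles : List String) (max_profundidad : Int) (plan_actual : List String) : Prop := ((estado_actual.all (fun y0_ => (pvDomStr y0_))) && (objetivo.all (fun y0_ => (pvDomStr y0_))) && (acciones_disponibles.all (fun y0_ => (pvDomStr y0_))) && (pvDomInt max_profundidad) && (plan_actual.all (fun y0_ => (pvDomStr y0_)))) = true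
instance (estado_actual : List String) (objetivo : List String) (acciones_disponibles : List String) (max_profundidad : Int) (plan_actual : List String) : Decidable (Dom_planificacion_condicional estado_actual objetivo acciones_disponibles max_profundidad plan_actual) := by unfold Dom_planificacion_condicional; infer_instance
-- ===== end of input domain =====

-- B replaces A's recursive depth-first search by an iterative one over an explicit LIFO stack of
-- (estado, plan, profundidad) frames, pushing children in reverse action order (objective: alternative
-- decomposition, same asymptotic cost).

-- ===== PORT A =====

-- the module-level `acciones` table: preconditions per action; `none` = key absent (Python: KeyError)
def pvPreconds (a : String) : Option (List String) :=
  if a = "despertarse" then some []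
  else if a = "levantarse" then some ["despertarse"]
  else if a = "tomar_cafe" then some ["levantarse"]
  else if a = "ir_a_trabajo" then some ["despertarse", "levantarse", "tomar_cafe"]
  else if a = "trabajar" then some ["ir_a_trabajo"]
  else none

def satisfacerCondicion (estado : List String) (condicion : String) : Bool :=
  estado.contains condicion

-- Python's aplicar_accion; on a key missing from `acciones` Python raises KeyError (excluded by Pre_),
-- here modelled as `none` (not applicable)
def aplicarAccion (estado : List String) (accion : String) : Option (List String) :=
  match pvPreconds accion with
  | none => none
  | some ps => if ps.all (satisfacerCondicion estado) then some (estado ++ [accion]) else none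

-- the `for accion in acciones_disponibles` loop of A, with the recursive call passed in
def pcALoop (rec_ : List String → List String → Option (List String))
    (estado plan : List String) : List String → Option (List String)
  | [] => none
  | a :: rs =>
    match aplicarAccion estado a with
    | none => pcALoop rec_ estado plan rs
    | some nuevo =>
      match rec_ nuevo (plan ++ [a]) with
      | some r => some r
      | none => pcALoop rec_ estado plan rs

-- A's recursion; the Int depth is run as a Nat fuel (exact for the depths ≥ 0 admitted by Pre_)
def pcA (objetivo acciones : List String) (fuel : Nat) (estado plan : List String) :
    Option (List String) :=
  if estado = objetivo then some plan
  else
    match fuel with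
    | 0 => none
    | n + 1 => pcALoop (pcA objetivo acciones n) estado plan acciones

def planificacion_condicional (estado_actual : List String) (objetivo : List String) (acciones_disponibles : List String) (max_profundidad : Int) (plan_actual : List String) : Option (List String) :=
  pcA objetivo acciones_disponibles max_profundidad.toNat estado_actual plan_actual

-- ===== PORT B =====

-- B's inner `for accion in reversed(acciones_disponibles)` push loop (head of list = top of stack)
def pcBpush (estado plan : List String) (profundidad : Int) (acciones : List String)
    (stack : List (List String × List String × Int)) : List (List String × List String × Int) :=
  acciones.reverse.foldl
    (fun st accion =>
      match aplicarAccion estado accion with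
      | some nuevo => (nuevo, plan ++ [accion], profundidad - 1) :: st
      | none => st)
    stack

-- B's `while stack:` loop, with a fuel bound on the number of iterations (within Pre_ the fuel
-- chosen by planificacion_condicional_alt is never exhausted)
def pcBrun (objetivo acciones : List String) (fuel : Nat)
    (stack : List (List String × List String × Int)) : Option (List String) :=
  match fuel with
  | 0 => none
  | n + 1 =>
    match stack with
    | [] => none
    | (estado, plan, profundidad) :: rest =>
      if estado = objetivo then some plan
      else if profundidad = 0 then pcBrun objetivo acciones n rest
      else pcBrun objetivo acciones n (pcBpush estado plan profundidad acciones rest)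

def planificacion_condicional_alt (estado_actual : List String) (objetivo : List String) (acciones_disponibles : List String) (max_profundidad : Int) (plan_actual : List String) : Option (List String) :=
  pcBrun objetivo acciones_disponibles
    ((acciones_disponibles.length + 1) ^ (max_profundidad.toNat + 1))
    [(estado_actual, plan_actual, max_profundidad)]

-- ===== PRECONDITION & SPEC =====

def pvAccionesValidas : List String :=
  ["despertarse", "levantarse", "tomar_cafe", "ir_a_trabajo", "trabajar"]

-- Pre_ excludes inputs where the search can reach an action missing from the global `acciones`
-- table (Python then usually raises KeyError) and negative depths (A's recursion has no base case
-- there and raises RecursionError whenever the search does not stumble on the goal first).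
def Pre_planificacion_condicional (estado_actual : List String) (objetivo : List String) (acciones_disponibles : List String) (max_profundidad : Int) (plan_actual : List String) : Prop :=
  estado_actual = objetivo ∨ max_profundidad = 0 ∨
    (0 < max_profundidad ∧ ∀ a ∈ acciones_disponibles, a ∈ pvAccionesValidas)

instance (estado_actual : List String) (objetivo : List String) (acciones_disponibles : List String) (max_profundidad : Int) (plan_actual : List String) : Decidable (Pre_planificacion_condicional estado_actual objetivo acciones_disponibles max_profundidad plan_actual) := by unfold Pre_planificacion_condicional; infer_instance

def pvWitness_planificacion_condicional : List String × List String × List String × Int × List String :=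
  (["despertarse"], ["despertarse", "levantarse"], ["levantarse"], 1, [])

def Spec_planificacion_condicional (estado_actual : List String) (objetivo : List String) (acciones_disponibles : List String) (max_profundidad : Int) (plan_actual : List String) (out : Option (List String)) : Prop := out = planificacion_condicional_alt estado_actual objetivo acciones_disponibles max_profundidad plan_actual
instance (estado_actual : List String) (objetivo : List String) (acciones_disponibles : List String) (max_profundidad : Int) (plan_actual : List String) (out : Option (List String)) : Decidable (Spec_planificacion_condicional estado_actual objetivo acciones_disponibles max_profundidad plan_actual out) := by unfold Spec_planificacion_condicional; infer_instance

-- ===== CLAIM (what is proved, stated in full; the proofs are below) =====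
def Claim_equal_planificacion_condicional : Prop := ∀ (estado_actual : List String) (objetivo : List String) (acciones_disponibles : List String) (max_profundidad : Int) (plan_actual : List String), Dom_planificacion_condicional estado_actual objetivo acciones_disponibles max_profundidad plan_actual → Pre_planificacion_condicional estado_actual objetivo acciones_disponibles max_profundidad plan_actual → Spec_planificacion_condicional estado_actual objetivo acciones_disponibles max_profundidad plan_actual (planificacion_condicional estado_actual objetivo acciones_disponibles max_profundidad plan_actual)

-- ===== LEMMAS AND PROOFS =====

-- weight of a frame / of a whole stack (k = number of available actions): a DFS starting from a
-- frame of depth t pops at most (k+1)^t frames, so the total weight bounds the iterations left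
def pvW (k : Nat) (f : List String × List String × Int) : Nat := (k + 1) ^ f.2.2.toNat
def pvM (k : Nat) (stack : List (List String × List String × Int)) : Nat := (stack.map (pvW k)).sum

-- invariant: every frame on the stack has nonnegative depth
def pvGood (stack : List (List String × List String × Int)) : Prop := ∀ f ∈ stack, 0 ≤ f.2.2

lemma pcBrun_nil (o acc : List String) (fuel : Nat) : pcBrun o acc fuel [] = none := by
  cases fuel <;> rfl

lemma pvM_cons (k : Nat) (f : List String × List String × Int) (l : List (List String × List String × Int)) :
    pvM k (f :: l) = pvW k f + pvM k l := by simp [pvM]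

lemma pvM_append (k : Nat) (l₁ l₂ : List (List String × List String × Int)) :
    pvM k (l₁ ++ l₂) = pvM k l₁ + pvM k l₂ := by simp [pvM]

lemma pvW_pos (k : Nat) (f : List String × List String × Int) : 1 ≤ pvW k f :=
  Nat.one_le_pow _ _ (by omega)

lemma pcBpush_eq (estado plan : List String) (prof : Int) (acc : List String)
    (stack : List (List String × List String × Int)) :
    pcBpush estado plan prof acc stack
      = acc.filterMap
          (fun a => (aplicarAccion estado a).map (fun nuevo => (nuevo, plan ++ [a], prof - 1)))
          ++ stack := by
  induction acc with
  | nil => rfl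
  | cons a l ih =>
    unfold pcBpush at ih ⊢
    rw [List.reverse_cons, List.foldl_append, ih]
    cases hfa : aplicarAccion estado a <;> simp [hfa]

lemma pvM_const_le (k c : Nat) :
    ∀ (l : List (List String × List String × Int)), (∀ f ∈ l, pvW k f = c) →
      pvM k l ≤ l.length * c := by
  intro l
  induction l with
  | nil => intro _; simp [pvM]
  | cons f l ih =>
    intro hall
    rw [pvM_cons, hall f (by simp)]
    have := ih (fun g hg => hall g (by simp [hg]))
    rw [List.length_cons, Nat.succ_mul]
    omega

lemma pvM_children_le (e p : List String) (prof : Int) (acc : List String) :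
    pvM acc.length
        (acc.filterMap
          (fun a => (aplicarAccion e a).map (fun nuevo => (nuevo, p ++ [a], prof - 1))))
      ≤ acc.length * (acc.length + 1) ^ (prof - 1).toNat := by
  have hlen : (acc.filterMap
      (fun a => (aplicarAccion e a).map (fun nuevo => (nuevo, p ++ [a], prof - 1)))).length
      ≤ acc.length := List.length_filterMap_le _ _
  have hconst : ∀ f ∈ acc.filterMap
      (fun a => (aplicarAccion e a).map (fun nuevo => (nuevo, p ++ [a], prof - 1))),
      pvW acc.length f = (acc.length + 1) ^ (prof - 1).toNat := by
    intro f hf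
    rcases List.mem_filterMap.1 hf with ⟨a, _, ha⟩
    cases hap : aplicarAccion e a with
    | none => simp [hap] at ha
    | some nuevo => simp [hap] at ha; subst ha; rfl
  calc pvM acc.length _ ≤ _ := pvM_const_le _ _ _ hconst
    _ ≤ acc.length * (acc.length + 1) ^ (prof - 1).toNat :=
      Nat.mul_le_mul_right _ hlen

lemma pvPushBound (e p : List String) (prof : Int) (acc : List String)
    (stack : List (List String × List String × Int)) (hpos : 0 < prof) :
    pvM acc.length (pcBpush e p prof acc stack) + 1
      ≤ (acc.length + 1) ^ prof.toNat + pvM acc.length stack := by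
  rw [pcBpush_eq, pvM_append]
  have h1 := pvM_children_le e p prof acc
  have ht : prof.toNat = (prof - 1).toNat + 1 := by omega
  have h2 : (acc.length + 1) ^ prof.toNat
      = (acc.length + 1) ^ (prof - 1).toNat * (acc.length + 1) := by
    rw [ht, pow_succ]
  have h3 : 1 ≤ (acc.length + 1) ^ (prof - 1).toNat := Nat.one_le_pow _ _ (by omega)
  nlinarith [h1, h3]

lemma pvGoodPush (e p : List String) (prof : Int) (acc : List String)
    (stack : List (List String × List String × Int)) (hpos : 0 < prof)
    (hg : pvGood stack) : pvGood (pcBpush e p prof acc stack) := by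
  rw [pcBpush_eq]
  intro f hf
  rcases List.mem_append.1 hf with hf | hf
  · rcases List.mem_filterMap.1 hf with ⟨a, _, ha⟩
    cases hap : aplicarAccion e a with
    | none => simp [hap] at ha
    | some nuevo => simp [hap] at ha; subst ha; simp; omega
  · exact hg f hf

-- fuel irrelevance: once the fuel covers the stack weight, the result no longer depends on it
lemma pvS (o acc : List String) :
    ∀ (f1 f2 : Nat) (stack : List (List String × List String × Int)), pvGood stack →
      pvM acc.length stack ≤ f1 → pvM acc.length stack ≤ f2 →
      pcBrun o acc f1 stack = pcBrun o acc f2 stack := by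
  intro f1
  induction f1 with
  | zero =>
    intro f2 stack hg h1 h2
    cases stack with
    | nil => rw [pcBrun_nil, pcBrun_nil]
    | cons f rest => have := pvW_pos acc.length f; rw [pvM_cons] at h1; omega
  | succ f1 ih =>
    intro f2 stack hg h1 h2
    cases stack with
    | nil => rw [pcBrun_nil, pcBrun_nil]
    | cons fr rest =>
      obtain ⟨e, p, prof⟩ := fr
      have hw := pvW_pos acc.length (e, p, prof)
      rw [pvM_cons] at h1 h2
      obtain ⟨f2', rfl⟩ : ∃ m, f2 = m + 1 := ⟨f2 - 1, by omega⟩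
      show pcBrun o acc (f1 + 1) ((e, p, prof) :: rest) = pcBrun o acc (f2' + 1) ((e, p, prof) :: rest)
      simp only [pcBrun]
      by_cases he : e = o
      · simp [he]
      · simp only [he, if_false]
        by_cases hp : prof = 0
        · simp only [hp, if_true]
          exact ih f2' rest (fun g hg' => hg g (by simp [hg'])) (by omega) (by omega)
        · simp only [hp, if_false]
          have hprof : 0 < prof := by
            have := hg (e, p, prof) (by simp); simp at this; omega
          have hb := pvPushBound e p prof acc rest hprof
          have hgp := pvGoodPush e p prof acc rest hprof
            (fun g hg' => hg g (by simp [hg']))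
          have hwp : pvW acc.length (e, p, prof) = (acc.length + 1) ^ prof.toNat := rfl
          exact ih f2' _ hgp (by omega) (by omega)

-- the key simulation lemma: popping a depth-d frame behaves like A's recursive call of depth d
lemma pvK (o acc : List String) :
    ∀ (d : Nat) (e p : List String) (stack : List (List String × List String × Int)) (fuel : Nat),
      pvGood stack → (acc.length + 1) ^ d + pvM acc.length stack ≤ fuel →
      pcBrun o acc fuel ((e, p, (d : Int)) :: stack)
        = (match pcA o acc d e p with
           | some r => some r
           | none => pcBrun o acc fuel stack) := by
  intro d
  induction d with
  | zero =>
    intro e p stack fuel hg hfuel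
    rw [pow_zero] at hfuel
    obtain ⟨f, rfl⟩ : ∃ m, fuel = m + 1 := ⟨fuel - 1, by omega⟩
    by_cases he : e = o
    · simp [pcBrun, pcA, he]
    · have hA : pcA o acc 0 e p = none := by simp [pcA, he]
      rw [hA]
      show pcBrun o acc (f + 1) ((e, p, ((0 : Nat) : Int)) :: stack) = pcBrun o acc (f + 1) stack
      simp only [pcBrun, Nat.cast_zero, he, if_false, if_true]
      exact pvS o acc f (f + 1) stack hg (by omega) (by omega)
  | succ n ih =>
    intro e p stack fuel hg hfuel
    have hpow1 : 1 ≤ (acc.length + 1) ^ (n + 1) := Nat.one_le_pow _ _ (by omega)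
    obtain ⟨f, rfl⟩ : ∃ m, fuel = m + 1 := ⟨fuel - 1, by omega⟩
    by_cases he : e = o
    · simp [pcBrun, pcA, he]
    · have hne : ((n + 1 : Nat) : Int) ≠ 0 := by exact_mod_cast Nat.succ_ne_zero n
      have hstep : pcBrun o acc (f + 1) ((e, p, ((n + 1 : Nat) : Int)) :: stack)
          = pcBrun o acc f (pcBpush e p ((n + 1 : Nat) : Int) acc stack) := by
        simp only [pcBrun, he, if_false, hne]
      have hc : ((n + 1 : Nat) : Int) - 1 = (n : Int) := by push_cast; ring
      have hpush : pcBpush e p ((n + 1 : Nat) : Int) acc stack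
          = acc.filterMap
              (fun a => (aplicarAccion e a).map (fun nuevo => (nuevo, p ++ [a], (n : Int))))
              ++ stack := by
        rw [pcBpush_eq]; simp only [hc]
      have hA : pcA o acc (n + 1) e p = pcALoop (pcA o acc n) e p acc := by
        simp [pcA, he]
      -- inner induction over the action list, mirroring A's for-loop
      have L : ∀ (l : List String),
          pvM acc.length
              (l.filterMap
                (fun a => (aplicarAccion e a).map (fun nuevo => (nuevo, p ++ [a], (n : Int)))))
            + pvM acc.length stack ≤ f →
          pcBrun o acc f
              (l.filterMap
                (fun a => (aplicarAccion e a).map (fun nuevo => (nuevo, p ++ [a], (n : Int))))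
                ++ stack)
            = (match pcALoop (pcA o acc n) e p l with
               | some r => some r
               | none => pcBrun o acc f stack) := by
        intro l
        induction l with
        | nil => intro _; simp [pcALoop]
        | cons a rs ihl =>
          intro hfl
          cases hap : aplicarAccion e a with
          | none =>
            rw [show List.filterMap
                  (fun a => (aplicarAccion e a).map (fun nuevo => (nuevo, p ++ [a], (n : Int))))
                  (a :: rs)
                = List.filterMap
                  (fun a => (aplicarAccion e a).map (fun nuevo => (nuevo, p ++ [a], (n : Int))))
                  rs from by simp [hap]] at hfl ⊢
            rw [ihl hfl]
            simp [pcALoop, hap]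
          | some nuevo =>
            rw [show List.filterMap
                  (fun a => (aplicarAccion e a).map (fun nuevo => (nuevo, p ++ [a], (n : Int))))
                  (a :: rs)
                = (nuevo, p ++ [a], (n : Int)) :: List.filterMap
                  (fun a => (aplicarAccion e a).map (fun nuevo => (nuevo, p ++ [a], (n : Int))))
                  rs from by simp [hap]] at hfl ⊢
            simp only [pvM_cons, pvW, Int.toNat_natCast] at hfl
            have hgood : pvGood
                (rs.filterMap
                  (fun a => (aplicarAccion e a).map (fun nuevo => (nuevo, p ++ [a], (n : Int))))
                  ++ stack) := by
              intro g hgmem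
              rcases List.mem_append.1 hgmem with hgm | hgm
              · rcases List.mem_filterMap.1 hgm with ⟨b, _, hb⟩
                cases hb2 : aplicarAccion e b with
                | none => simp [hb2] at hb
                | some nb => simp [hb2] at hb; subst hb; simp
              · exact hg g hgm
            rw [List.cons_append, ih nuevo (p ++ [a]) _ f hgood
              (by simp only [pvM_append]; omega)]
            cases hr : pcA o acc n nuevo (p ++ [a]) with
            | some r => simp [pcALoop, hap, hr]
            | none =>
              rw [ihl (by omega)]
              simp [pcALoop, hap, hr]
      have hchild := pvM_children_le e p ((n + 1 : Nat) : Int) acc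
      rw [hc] at hchild
      have hsplit : acc.length * (acc.length + 1) ^ ((n : Int)).toNat + 1
          ≤ (acc.length + 1) ^ (n + 1) := by
        have : ((n : Int)).toNat = n := by simp
        rw [this, pow_succ]
        have h3 : 1 ≤ (acc.length + 1) ^ n := Nat.one_le_pow _ _ (by omega)
        nlinarith
      rw [hstep, hpush, hA, L acc (by omega)]
      cases hloop : pcALoop (pcA o acc n) e p acc with
      | some r => rfl
      | none => exact pvS o acc f (f + 1) stack hg (by omega) (by omega)

-- ===== VERDICT (by name: the statement is the Claim_ definition above) =====
theorem planificacion_condicional_spec : Claim_equal_planificacion_condicional := by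
  intro e o acc d p _hDom hPre
  unfold Spec_planificacion_condicional planificacion_condicional planificacion_condicional_alt
  have hfuelpos : 1 ≤ (acc.length + 1) ^ (d.toNat + 1) := Nat.one_le_pow _ _ (by omega)
  obtain ⟨m, hm⟩ : ∃ m, (acc.length + 1) ^ (d.toNat + 1) = m + 1 :=
    ⟨(acc.length + 1) ^ (d.toNat + 1) - 1, by omega⟩
  rcases hPre with he | h0 | ⟨hpos, _hval⟩
  · rw [hm, pcA.eq_def]
    simp [pcBrun, he]
  · subst h0
    by_cases he : e = o
    · rw [hm]; simp [pcA, pcBrun, he]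
    · rw [hm]
      show pcA o acc (0 : Int).toNat e p = pcBrun o acc (m + 1) [(e, p, 0)]
      simp [pcA, pcBrun, he, pcBrun_nil]
  · have hd : ((d.toNat : Nat) : Int) = d := Int.toNat_of_nonneg hpos.le
    have hK := pvK o acc d.toNat e p [] ((acc.length + 1) ^ (d.toNat + 1))
      (by intro f hf; simp at hf)
      (by
        have : pvM acc.length ([] : List (List String × List String × Int)) = 0 := by simp [pvM]
        rw [this]
        have := Nat.pow_le_pow_right (n := acc.length + 1) (by omega) (Nat.le_succ d.toNat)
        omega)
    rw [hd] at hK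
    rw [hK]
    cases hA : pcA o acc d.toNat e p with
    | some r => rfl
    | none => rw [pcBrun_nil]
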